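-- pv_equiv track=rewrite | github.com/6112/project-euler | problems/092.py | permutation_count
-- ===== SOURCE A (Python) =====
-- from collections import defaultdict
--
-- def factorial(n):
--     """Return the `n!`."""
--     acc = 1
--     for i in range(2, n + 1):
--         acc *= i
--     return acc
--
-- def permutation_count(xs):
--     """Return the number of permutations of the sequence `xs`, taking into
--     account duplicate elements."""
--     lookup = defaultdict(lambda: 0)
--     for x in xs:
--         lookup[x] += 1
--     base = factorial(len(xs))
--     for i in lookup.values():
--         base //= factorial(i)
--     return base
-- ===== SOURCE B (Python) =====
-- def permutation_count(xs):
--     """Return the number of permutations of the sequence `xs`, taking into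
--     account duplicate elements."""
--     counts = {}
--     result = 1
--     for i, x in enumerate(xs, 1):
--         c = counts.get(x, 0) + 1
--         counts[x] = c
--         result = result * i // c
--     return result
-- ===== Notes on version B (the rewrite author's own statement) =====
-- stated objective: alternative
-- what changed: Replaces the two-phase factorial formula (build a multiplicity dict, compute len(xs)!, then floor-divide by each multiplicity's factorial) with a single pass that keeps a running count per element and updates the result by one exact multiply-then-integer-divide per element, computing the multinomial incrementally with no factorials at all.
import Mathlib
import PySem

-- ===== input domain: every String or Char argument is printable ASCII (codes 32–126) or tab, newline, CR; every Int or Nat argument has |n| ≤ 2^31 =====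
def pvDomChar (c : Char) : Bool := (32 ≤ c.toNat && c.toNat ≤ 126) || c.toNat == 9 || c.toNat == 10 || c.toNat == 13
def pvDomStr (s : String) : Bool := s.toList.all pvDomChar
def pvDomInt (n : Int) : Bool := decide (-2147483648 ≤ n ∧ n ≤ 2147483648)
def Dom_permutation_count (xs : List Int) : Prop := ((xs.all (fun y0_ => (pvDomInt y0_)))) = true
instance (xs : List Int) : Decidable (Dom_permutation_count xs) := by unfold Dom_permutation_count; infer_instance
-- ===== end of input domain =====

-- B replaces A's "n! floor-divided by the factorial of each multiplicity" by a single pass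
-- that keeps a running count per element and updates the result with one exact
-- multiply-then-divide per element (objective: alternative decomposition, no factorials).

-- ===== PORT A =====
def factorial_a (n : Int) : Int :=
  (PySem.List.pyRange 2 (n + 1) 1).foldl (fun acc i => acc * i) 1

def permutation_count (xs : List Int) : Int :=
  let lookup := xs.foldl (fun d x => d.modify x 0 (· + 1)) (PySem.Dict.empty : PySem.Dict Int Int)
  let base := factorial_a (xs.length : Int)
  lookup.values.foldl (fun b i => PySem.Int.floordiv b (factorial_a i)) base

-- ===== PORT B =====
def permutation_count_alt (xs : List Int) : Int :=
  (((PySem.List.enumerate xs 1).foldl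
      (fun (st : PySem.Dict Int Int × Int) (p : Int × Int) =>
        let c := st.1.getD p.2 0 + 1
        (st.1.insert p.2 c, PySem.Int.floordiv (st.2 * p.1) c))
      ((PySem.Dict.empty : PySem.Dict Int Int), 1))).2

-- ===== PRECONDITION & SPEC =====
def Spec_permutation_count (xs : List Int) (out : Int) : Prop := out = permutation_count_alt xs
instance (xs : List Int) (out : Int) : Decidable (Spec_permutation_count xs out) := by unfold Spec_permutation_count; infer_instance

-- ===== CLAIM (what is proved, stated in full; the proofs are below) =====
def Claim_equal_permutation_count : Prop := ∀ (xs : List Int), Dom_permutation_count xs → Spec_permutation_count xs (permutation_count xs)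

-- ===== LEMMAS AND PROOFS =====

-- the product of the factorials of the multiplicities of the elements of xs
def factProd (xs : List Int) : Nat :=
  ((PySem.Set.ofList xs).map (fun k => Nat.factorial (xs.count k))).prod

-- A's literal factorial loop computes Nat.factorial
theorem factorial_a_natCast (n : Nat) : factorial_a (n : Int) = (Nat.factorial n : Int) := by
  unfold factorial_a
  induction n with
  | zero => rw [PySem.List.pyRange_one_eq_nil (by norm_num)]; rfl
  | succ m ih =>
      rcases Nat.eq_zero_or_pos m with hm | hm
      · subst hm; rw [PySem.List.pyRange_one_eq_nil (by norm_num)]; rfl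
      · have h2 : (2 : Int) ≤ (m : Int) + 1 := by omega
        rw [show ((((m+1) : Nat) : Int) + 1) = ((m : Int) + 1) + 1 by push_cast; ring,
            PySem.List.pyRange_one_succ_right h2, List.foldl_append, ih]
        simp [Nat.factorial_succ]; ring

-- the product of the factorials of a list of naturals divides the factorial of its sum
theorem prod_fact_dvd_fact_sum (l : List Nat) : (l.map Nat.factorial).prod ∣ (l.sum).factorial := by
  induction l with
  | nil => simp
  | cons a t ih =>
      simp only [List.map_cons, List.prod_cons, List.sum_cons]
      exact dvd_trans (mul_dvd_mul_left _ ih) (Nat.factorial_mul_factorial_dvd_factorial_add a t.sum)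

-- the multiplicities over the distinct elements sum to the length
theorem sum_count_ofList (xs : List Int) :
    ((PySem.Set.ofList xs).map (fun k => xs.count k)).sum = xs.length := by
  have hperm : (PySem.Set.ofList xs).Perm xs.dedup := by
    rw [List.perm_ext_iff_of_nodup (PySem.Set.nodup_ofList xs) xs.nodup_dedup]
    intro a; rw [PySem.Set.mem_ofList, List.mem_dedup]
  rw [List.Perm.sum_eq (hperm.map _), List.sum_map_count_dedup_eq_length]

theorem factProd_dvd (xs : List Int) : factProd xs ∣ (xs.length).factorial := by
  have h := prod_fact_dvd_fact_sum ((PySem.Set.ofList xs).map (fun k => xs.count k))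
  rw [List.map_map, sum_count_ofList] at h
  exact h

-- changing a function at one member of a nodup list rescales the product of its map
theorem prod_map_update (s : List Int) (f g : Int → Nat) (x : Int)
    (hnd : s.Nodup) (hx : x ∈ s) (hfg : ∀ k ∈ s, k ≠ x → g k = f k) :
    (s.map g).prod * f x = (s.map f).prod * g x := by
  induction s with
  | nil => cases hx
  | cons a t ih =>
      rcases List.nodup_cons.mp hnd with ⟨hat, hndt⟩
      simp only [List.map_cons, List.prod_cons]
      by_cases hax : a = x
      · subst hax
        have : t.map g = t.map f := List.map_congr_left (fun k hk =>
          hfg k (List.mem_cons_of_mem _ hk) (fun h => hat (h ▸ hk)))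
        rw [this]; ring
      · have hxt : x ∈ t := (List.mem_cons.mp hx).resolve_left (fun h => hax h.symm)
        have hga : g a = f a := hfg a List.mem_cons_self (fun h => hax h)
        rw [hga, mul_assoc, mul_assoc,
          ih hndt hxt (fun k hk hkx => hfg k (List.mem_cons_of_mem _ hk) hkx)]

-- appending one element multiplies the factorial product by the new multiplicity
theorem factProd_append (xs : List Int) (x : Int) :
    factProd (xs ++ [x]) = factProd xs * (xs.count x + 1) := by
  unfold factProd
  rw [PySem.Set.ofList_append_singleton]
  by_cases hx : x ∈ xs
  · rw [PySem.Set.add_of_mem (by rw [PySem.Set.mem_ofList]; exact hx)]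
    have key := prod_map_update (PySem.Set.ofList xs)
      (fun k => Nat.factorial (xs.count k)) (fun k => Nat.factorial ((xs ++ [x]).count k)) x
      (PySem.Set.nodup_ofList xs) (by rw [PySem.Set.mem_ofList]; exact hx)
      (fun k _ hkx => by
        simp only [List.count_append, List.count_singleton]
        simp [Ne.symm hkx])
    have hcx : (xs ++ [x]).count x = xs.count x + 1 := by
      simp [List.count_append]
    apply Nat.eq_of_mul_eq_mul_right (Nat.factorial_pos (xs.count x))
    calc ((PySem.Set.ofList xs).map (fun k => Nat.factorial ((xs ++ [x]).count k))).prod * Nat.factorial (xs.count x)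
        = ((PySem.Set.ofList xs).map (fun k => Nat.factorial (xs.count k))).prod * Nat.factorial ((xs ++ [x]).count x) := key
      _ = _ := by rw [hcx, Nat.factorial_succ]; ring
  · rw [PySem.Set.add_of_not_mem (by rw [PySem.Set.mem_ofList]; exact hx)]
    have h1 : (PySem.Set.ofList xs).map (fun k => Nat.factorial ((xs ++ [x]).count k))
        = (PySem.Set.ofList xs).map (fun k => Nat.factorial (xs.count k)) := by
      apply List.map_congr_left
      intro k hk
      have hkx : k ≠ x := fun h => by
        rw [PySem.Set.mem_ofList] at hk; exact hx (h ▸ hk)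
      simp only [List.count_append, List.count_singleton]
      simp [Ne.symm hkx]
    have h2 : xs.count x = 0 := List.count_eq_zero.mpr hx
    rw [List.map_append, List.prod_append, h1]
    simp [List.count_append, h2]

-- A's division loop: floor-dividing in turn by the factorials is exact division by their product
theorem foldl_floordiv_fact (l : List Nat) : ∀ (k : Nat), (l.map Nat.factorial).prod ∣ k →
    (l.map Int.ofNat).foldl (fun b i => PySem.Int.floordiv b (factorial_a i)) (k : Int)
      = ((k / (l.map Nat.factorial).prod : Nat) : Int) := by
  induction l with
  | nil => intro k _; simp
  | cons a t ih =>
      intro k hdvd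
      rw [List.map_cons, List.prod_cons] at hdvd
      rw [List.map_cons, List.foldl_cons, List.map_cons, List.prod_cons]
      have ha : Nat.factorial a ∣ k := dvd_trans (Dvd.intro _ rfl) hdvd
      have hstep : PySem.Int.floordiv (k : Int) (factorial_a (Int.ofNat a)) = ((k / Nat.factorial a : Nat) : Int) := by
        rw [show (Int.ofNat a) = (a : Int) from rfl]
        rw [factorial_a_natCast a]
        exact_mod_cast PySem.Int.floordiv_natCast k (Nat.factorial a)
      rw [hstep, ih (k / Nat.factorial a) ((Nat.dvd_div_iff_mul_dvd ha).mpr hdvd),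
          Nat.div_div_eq_div_mul]

-- A computes the multinomial coefficient length! / factProd
theorem permutation_count_eq (xs : List Int) :
    permutation_count xs = (((xs.length).factorial / factProd xs : Nat) : Int) := by
  unfold permutation_count
  rw [show xs.foldl (fun d x => d.modify x 0 (· + 1)) (PySem.Dict.empty : PySem.Dict Int Int)
        = PySem.Dict.counter xs from (PySem.Dict.counter_eq_foldl xs).symm]
  have hvals : (PySem.Dict.counter xs).values
      = ((PySem.Set.ofList xs).map (fun k => xs.count k)).map Int.ofNat := by
    show ((PySem.Dict.counter xs).items).map (·.2) = _
    rw [PySem.Dict.items_counter, List.map_map, List.map_map]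
    rfl
  show List.foldl _ (factorial_a (xs.length : Int)) (PySem.Dict.counter xs).values = _
  rw [hvals, factorial_a_natCast,
      foldl_floordiv_fact _ _ (by rw [List.map_map]; exact factProd_dvd xs)]
  rw [List.map_map]
  rfl

-- B's loop invariant: running counts are the counter, the result is the running multinomial
theorem bfold (xs : List Int) :
    (PySem.List.enumerate xs 1).foldl
      (fun (st : PySem.Dict Int Int × Int) (p : Int × Int) =>
        let c := st.1.getD p.2 0 + 1
        (st.1.insert p.2 c, PySem.Int.floordiv (st.2 * p.1) c))
      ((PySem.Dict.empty : PySem.Dict Int Int), 1)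
    = (PySem.Dict.counter xs, (((xs.length).factorial / factProd xs : Nat) : Int)) := by
  induction xs using List.reverseRecOn with
  | nil => rfl
  | append_singleton q x ih =>
      rw [PySem.List.enumerate_append, List.foldl_append, ih]
      show (_, _) = _
      have hc : (PySem.Dict.counter q).getD x 0 = (q.count x : Int) := PySem.Dict.getD_counter q x
      refine Prod.ext ?_ ?_
      · show (PySem.Dict.counter q).insert x ((PySem.Dict.counter q).getD x 0 + 1) = PySem.Dict.counter (q ++ [x])
        rw [PySem.Dict.counter_append_singleton]; rfl
      · show PySem.Int.floordiv ((((q.length.factorial / factProd q : Nat) : Int)) * (1 + (q.length : Int)))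
            ((PySem.Dict.counter q).getD x 0 + 1) = _
        rw [hc]
        have e1 : (((q.length.factorial / factProd q : Nat) : Int)) * (1 + (q.length : Int))
            = ((q.length.factorial / factProd q * (q.length + 1) : Nat) : Int) := by push_cast; ring
        have e2 : ((q.count x : Nat) : Int) + 1 = ((q.count x + 1 : Nat) : Int) := by push_cast; ring
        rw [e1, e2, show PySem.Int.floordiv ((q.length.factorial / factProd q * (q.length + 1) : Nat) : Int)
              ((q.count x + 1 : Nat) : Int)
            = ((q.length.factorial / factProd q * (q.length + 1) / (q.count x + 1) : Nat) : Int) from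
          by exact_mod_cast PySem.Int.floordiv_natCast _ _]
        have hnat : q.length.factorial / factProd q * (q.length + 1) / (q.count x + 1)
            = (q ++ [x]).length.factorial / factProd (q ++ [x]) := by
          rw [mul_comm, ← Nat.mul_div_assoc _ (factProd_dvd q)]
          rw [Nat.div_div_eq_div_mul, factProd_append]
          simp [Nat.factorial_succ, mul_comm]
        rw [hnat]

-- B computes the same multinomial coefficient
theorem permutation_count_alt_eq (xs : List Int) :
    permutation_count_alt xs = (((xs.length).factorial / factProd xs : Nat) : Int) := by
  unfold permutation_count_alt
  rw [bfold xs]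

-- ===== VERDICT (by name: the statement is the Claim_ definition above) =====
theorem permutation_count_spec : Claim_equal_permutation_count := by
  intro xs _
  unfold Spec_permutation_count
  rw [permutation_count_eq, permutation_count_alt_eq]
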